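-- pv_equiv track=rewrite | github.com/bloomberg/pycsvw | pycsvw/nt_serializer.py | create_literal
-- ===== SOURCE A (Python) =====
-- def create_literal(val, datatype=None, lang=None):
--     """
--     Put the value in unicode escaping new special characters to keep canonical form
--     From NT specification at 'https://www.w3.org/TR/n-triples/#canonical-ntriples':
--     "Within STRING_LITERAL_QUOTE, only the characters U+0022, U+005C, U+000A, U+000D are
--     encoded using ECHAR. ECHAR must not be used for characters that are allowed directly
--     in STRING_LITERAL_QUOTE."
--     """
--
--     escape_pairs = [(u'\u005C', r'\\'), (u'\u0022', r'\"'), (u"\u000A", r'\n'), (u"\u000D", r'\r')]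
--     for orig, rep in escape_pairs:
--         val = val.replace(orig, rep)
--
--     lit_value = u'"{}"'.format(val)
--
--     if datatype is not None:
--         lit_value += "^^<{}>".format(datatype)
--     elif lang is not None:
--         lit_value += "@{}".format(lang)
--     return lit_value
-- ===== SOURCE B (Python) =====
-- def create_literal(val, datatype=None, lang=None):
--     """Escape U+005C, U+0022, U+000A, U+000D and wrap as an NT literal.
--
--     Single character-by-character pass with a piece accumulator and one
--     final join, instead of four staged full-string replace passes.
--     """
--     esc = {'\\': '\\\\', '"': '\\"', '\n': '\\n', '\r': '\\r'}
--     parts = ['"']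
--     for ch in val:
--         parts.append(esc.get(ch, ch))
--     parts.append('"')
--     if datatype is not None:
--         parts.append('^^<{}>'.format(datatype))
--     elif lang is not None:
--         parts.append('@{}'.format(lang))
--     return ''.join(parts)
-- ===== Notes on version B (the rewrite author's own statement) =====
-- stated objective: alternative
-- what changed: Replaced A's four staged full-string replace passes (each rebuilding the whole string) by one character-by-character pass that appends each character's escape (dict lookup) to a piece accumulator joined once at the end.
import Mathlib
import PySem

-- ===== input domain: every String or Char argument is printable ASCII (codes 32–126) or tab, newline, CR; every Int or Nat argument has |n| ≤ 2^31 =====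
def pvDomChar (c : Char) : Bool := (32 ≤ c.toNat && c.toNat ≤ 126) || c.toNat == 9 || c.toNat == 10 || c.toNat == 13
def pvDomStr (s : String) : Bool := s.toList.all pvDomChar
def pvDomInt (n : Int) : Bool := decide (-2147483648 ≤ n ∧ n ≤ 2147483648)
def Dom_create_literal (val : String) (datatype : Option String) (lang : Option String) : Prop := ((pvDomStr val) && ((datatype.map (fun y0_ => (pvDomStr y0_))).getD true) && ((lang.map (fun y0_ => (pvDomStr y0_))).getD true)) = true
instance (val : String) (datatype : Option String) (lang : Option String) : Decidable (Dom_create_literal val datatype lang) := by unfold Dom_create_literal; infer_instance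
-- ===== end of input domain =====

-- B replaces A's four staged full-string replace passes by one char-by-char pass
-- appending each character's escape to a piece accumulator, joined once (alternative).

-- ===== PORT A =====
-- the escape_pairs list, and the for-loop over it as a foldl of PySem.Str.replace
def create_literal (val : String) (datatype : Option String) (lang : Option String) : String :=
  let escape_pairs : List (String × String) :=
    [("\\", "\\\\"), ("\"", "\\\""), ("\n", "\\n"), ("\r", "\\r")]
  let val := escape_pairs.foldl (fun v p => PySem.Str.replace v p.1 p.2) val
  let lit_value := "\"" ++ val ++ "\""
  match datatype with
  | some dt => lit_value ++ "^^<" ++ dt ++ ">"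
  | none =>
    match lang with
    | some lg => lit_value ++ "@" ++ lg
    | none => lit_value

-- ===== PORT B =====
-- the esc dict literal; esc.get(ch, ch) is Dict.getD
def pvEscDict : PySem.Dict Char String :=
  PySem.Dict.ofList [('\\', "\\\\"), ('"', "\\\""), ('\n', "\\n"), ('\r', "\\r")]

def create_literal_alt (val : String) (datatype : Option String) (lang : Option String) : String :=
  let parts : List String := ["\""]
  let parts := val.toList.foldl
    (fun ps ch => ps ++ [PySem.Dict.getD pvEscDict ch (String.singleton ch)]) parts
  let parts := parts ++ ["\""]
  let parts :=
    match datatype with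
    | some dt => parts ++ ["^^<" ++ dt ++ ">"]
    | none =>
      match lang with
      | some lg => parts ++ ["@" ++ lg]
      | none => parts
  PySem.Str.join "" parts

-- ===== PRECONDITION & SPEC =====
def Spec_create_literal (val : String) (datatype : Option String) (lang : Option String) (out : String) : Prop := out = create_literal_alt val datatype lang
instance (val : String) (datatype : Option String) (lang : Option String) (out : String) : Decidable (Spec_create_literal val datatype lang out) := by unfold Spec_create_literal; infer_instance

-- ===== CLAIM (what is proved, stated in full; the proofs are below) =====
def Claim_equal_create_literal : Prop := ∀ (val : String) (datatype : Option String) (lang : Option String), Dom_create_literal val datatype lang → Spec_create_literal val datatype lang (create_literal val datatype lang)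

-- ===== LEMMAS AND PROOFS =====

-- what one character becomes under the escape table
def pvTranslateChar (c : Char) : List Char :=
  if c = '\\' then ['\\', '\\']
  else if c = '"' then ['\\', '"']
  else if c = '\n' then ['\\', 'n']
  else if c = '\r' then ['\\', 'r']
  else [c]

-- single-char subst as a flatMap
def pvSubst (o : Char) (new : List Char) (c : Char) : List Char :=
  if c = o then new else [c]

lemma replace_go_single (o : Char) (new : List Char) :
    ∀ (l : List Char) (fuel : Nat) (acc : List Char), l.length ≤ fuel →
      PySem.Chars.replace.go [o] new fuel l acc = acc.reverse ++ l.flatMap (pvSubst o new) := by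
  intro l
  induction l with
  | nil =>
    intro fuel acc _
    cases fuel <;> simp [PySem.Chars.replace.go.eq_def]
  | cons c t ih =>
    intro fuel acc h
    cases fuel with
    | zero => simp at h
    | succ n =>
      have ht : t.length ≤ n := by simpa using h
      rw [PySem.Chars.replace.go.eq_def]
      simp only [List.length_cons, List.length_nil, List.drop_succ_cons, List.drop_zero]
      by_cases hc : c = o
      · subst hc
        rw [if_pos (by simp [List.isPrefixOf]), ih n _ ht]
        simp [pvSubst]
      · rw [if_neg (by simp [List.isPrefixOf, Ne.symm hc]), ih n _ ht]
        simp [pvSubst, hc]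

lemma replace_single (s : List Char) (o : Char) (new : List Char) :
    PySem.Chars.replace s [o] new = s.flatMap (pvSubst o new) := by
  rw [PySem.Chars.replace]
  simp only [List.isEmpty_cons, if_neg Bool.false_ne_true]
  simpa using replace_go_single o new s s.length [] le_rfl

-- the composition of the four single-char substitutions acts per character as pvTranslateChar
lemma chain_eq_translate (s : List Char) :
    (((s.flatMap (pvSubst '\\' ['\\','\\'])).flatMap (pvSubst '"' ['\\','"'])).flatMap
        (pvSubst '\n' ['\\','n'])).flatMap (pvSubst '\r' ['\\','r'])
      = s.flatMap pvTranslateChar := by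
  rw [List.flatMap_assoc, List.flatMap_assoc, List.flatMap_assoc]
  apply List.flatMap_congr
  intro c _
  unfold pvTranslateChar pvSubst
  by_cases h1 : c = '\\'
  · subst h1; decide
  · rw [if_neg h1, if_neg h1]
    by_cases h2 : c = '"'
    · subst h2; decide
    · rw [if_neg h2]
      simp only [List.flatMap_cons, List.flatMap_nil, List.append_nil, if_neg h2]
      by_cases h3 : c = '\n'
      · subst h3; decide
      · rw [if_neg h3]
        simp only [List.flatMap_cons, List.flatMap_nil, List.append_nil, if_neg h3]

-- A's escape loop (already on char lists) computes flatMap pvTranslateChar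
lemma chain_replace (l : List Char) :
    PySem.Chars.replace (PySem.Chars.replace (PySem.Chars.replace
        (PySem.Chars.replace l ['\\'] ['\\', '\\']) ['"'] ['\\', '"'])
        ['\n'] ['\\', 'n']) ['\r'] ['\\', 'r']
      = l.flatMap pvTranslateChar := by
  rw [replace_single, replace_single, replace_single, replace_single]
  exact chain_eq_translate l

-- the dict lookup on one character is pvTranslateChar
lemma escDict_getD (c : Char) :
    (PySem.Dict.getD pvEscDict c (String.singleton c)).toList = pvTranslateChar c := by
  by_cases h1 : c = '\\'
  · subst h1; decide
  · by_cases h2 : c = '"'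
    · subst h2; decide
    · by_cases h3 : c = '\n'
      · subst h3; decide
      · by_cases h4 : c = '\r'
        · subst h4; decide
        · have hit : pvEscDict.items
              = [('\\', "\\\\"), ('"', "\\\""), ('\n', "\\n"), ('\r', "\\r")] := by decide
          have e1 : (('\\' : Char) == c) = false := by simp [Ne.symm h1]
          have e2 : (('"' : Char) == c) = false := by simp [Ne.symm h2]
          have e3 : (('\n' : Char) == c) = false := by simp [Ne.symm h3]
          have e4 : (('\r' : Char) == c) = false := by simp [Ne.symm h4]
          simp [PySem.Dict.getD, PySem.Dict.get?, hit, List.find?, e1, e2, e3, e4,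
            pvTranslateChar, h1, h2, h3, h4]

-- B's append-only accumulator loop is init ++ map
lemma foldl_snoc {α β : Type} (g : α → β) :
    ∀ (l : List α) (init : List β),
      l.foldl (fun ps c => ps ++ [g c]) init = init ++ l.map g := by
  intro l
  induction l with
  | nil => intro init; simp
  | cons c t ih => intro init; simp [ih]

-- joining with the empty separator is flatten (char level, then bridged to Str)
lemma chars_join_empty (l : List (List Char)) : PySem.Chars.join [] l = l.flatten := by
  induction l with
  | nil => rfl
  | cons a t ih =>
    cases t with
    | nil => simp [PySem.Chars.join_singleton]
    | cons b r => rw [PySem.Chars.join_cons_cons, ih]; simp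

lemma join_empty (parts : List String) :
    (PySem.Str.join "" parts).toList = (parts.map String.toList).flatten := by
  rw [PySem.Str.toList_join]
  have h0 : ("" : String).toList = ([] : List Char) := by decide
  rw [h0, chars_join_empty]

-- A's escape foldl, on toList
lemma escA (val : String) :
    (List.foldl (fun v p => PySem.Str.replace v p.1 p.2) val
        [("\\", "\\\\"), ("\"", "\\\""), ("\n", "\\n"), ("\r", "\\r")]).toList
      = val.toList.flatMap pvTranslateChar := by
  simp only [List.foldl_cons, List.foldl_nil, PySem.Str.toList_replace]
  have hbs : ("\\" : String).toList = ['\\'] := by decide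
  have hq : ("\"" : String).toList = ['"'] := by decide
  have hn : ("\n" : String).toList = ['\n'] := by decide
  have hr : ("\r" : String).toList = ['\r'] := by decide
  have hbs2 : ("\\\\" : String).toList = ['\\', '\\'] := by decide
  have hq2 : ("\\\"" : String).toList = ['\\', '"'] := by decide
  have hn2 : ("\\n" : String).toList = ['\\', 'n'] := by decide
  have hr2 : ("\\r" : String).toList = ['\\', 'r'] := by decide
  rw [hbs, hq, hn, hr, hbs2, hq2, hn2, hr2]
  exact chain_replace val.toList

-- B's escape map, flattened
lemma escB (l : List Char) :
    (l.map (String.toList ∘ fun ch => PySem.Dict.getD pvEscDict ch (String.singleton ch))).flatten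
      = l.flatMap pvTranslateChar := by
  induction l with
  | nil => rfl
  | cons c t ih => simp [Function.comp, ih, List.flatMap_cons, escDict_getD c]

-- ===== VERDICT (by name: the statement is the Claim_ definition above) =====
theorem create_literal_spec : Claim_equal_create_literal := by
  intro val datatype lang _
  unfold Spec_create_literal create_literal create_literal_alt
  apply String.toList_injective
  dsimp only
  rw [foldl_snoc]
  cases datatype with
  | some dt =>
    rw [join_empty]
    simp only [List.map_append, List.map_cons, List.map_nil, List.map_map,
      List.flatten_append, List.flatten_cons, List.flatten_nil,
      String.toList_append, escA, escB]
    simp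
  | none =>
    cases lang with
    | some lg =>
      rw [join_empty]
      simp only [List.map_append, List.map_cons, List.map_nil, List.map_map,
        List.flatten_append, List.flatten_cons, List.flatten_nil,
        String.toList_append, escA, escB]
      simp
    | none =>
      rw [join_empty]
      simp only [List.map_append, List.map_cons, List.map_nil, List.map_map,
        List.flatten_append, List.flatten_cons, List.flatten_nil,
        String.toList_append, escA, escB]
      simp
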